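-- pv_equiv track=rewrite | github.com/rickyurvinauc/IIC1103_2025_I | clases/Clase21_repaso_I2/p12_compilado_listas.py | dias_mas_lluvia
-- ===== SOURCE A (Python) =====
-- def dias_mas_lluvia(lluvia_mes):
--     cant_mayor = 0
--     dia_mayor = 0
--     dias = []
--     for i_lluvia in range(0,len(lluvia_mes),2):
--         cant_lluvia = lluvia_mes[i_lluvia+1]
--         if cant_lluvia > cant_mayor:
--             cant_mayor = cant_lluvia
--             dia_mayor = lluvia_mes[i_lluvia]
--     for i_lluvia in range(0,len(lluvia_mes),2):
--         cant_lluvia = lluvia_mes[i_lluvia+1]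
--         if cant_lluvia == cant_mayor:
--             dia_mayor = lluvia_mes[i_lluvia]
--             dias.append(dia_mayor)
--     return dias
-- ===== SOURCE B (Python) =====
-- def dias_mas_lluvia(lluvia_mes):
--     # one pass over the (day, rain) pairs: reset the day list when a new maximum appears
--     cant_mayor = 0
--     dias = []
--     for i_lluvia in range(0, len(lluvia_mes), 2):
--         cant_lluvia = lluvia_mes[i_lluvia + 1]
--         if cant_lluvia > cant_mayor:
--             cant_mayor = cant_lluvia
--             dias = [lluvia_mes[i_lluvia]]
--         elif cant_lluvia == cant_mayor:
--             dias.append(lluvia_mes[i_lluvia])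
--     return dias
-- ===== Notes on version B (the rewrite author's own statement) =====
-- stated objective: simpler
-- what changed: Replaces A's two passes over the index range (one to find the maximum rainfall, one to collect the matching days) with a single pass that maintains the running maximum and a day list that is reset whenever a strictly larger rainfall appears; Pre_ excludes odd-length lists, on which A raises IndexError (B raises there too).
import Mathlib
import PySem

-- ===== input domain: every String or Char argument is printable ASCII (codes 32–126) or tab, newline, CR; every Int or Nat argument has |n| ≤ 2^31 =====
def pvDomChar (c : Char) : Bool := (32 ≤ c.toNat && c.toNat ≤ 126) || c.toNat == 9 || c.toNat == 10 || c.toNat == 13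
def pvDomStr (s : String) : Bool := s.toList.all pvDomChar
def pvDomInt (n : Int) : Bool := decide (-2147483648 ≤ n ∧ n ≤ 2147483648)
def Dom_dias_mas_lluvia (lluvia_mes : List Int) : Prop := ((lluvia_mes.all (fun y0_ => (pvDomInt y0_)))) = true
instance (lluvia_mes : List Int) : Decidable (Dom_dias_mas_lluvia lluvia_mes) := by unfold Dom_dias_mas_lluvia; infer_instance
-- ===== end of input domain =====

-- B fuses A's two passes into one, resetting the collected-day list on each new maximum (one pass instead of two; simpler).
-- A raises IndexError on odd-length input (lluvia_mes[i+1]); Pre_ excludes exactly those lists.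

-- ===== PORT A =====
def dias_mas_lluvia (lluvia_mes : List Int) : List Int :=
  -- pass 1: find the maximum rainfall (state = (cant_mayor, dia_mayor))
  let step1 := (PySem.List.pyRange 0 (PySem.List.len lluvia_mes) 2).foldl
    (fun (st : Int × Int) i_lluvia =>
      let cant_lluvia := PySem.List.pyGetD lluvia_mes (i_lluvia + 1) 0
      if cant_lluvia > st.1 then (cant_lluvia, PySem.List.pyGetD lluvia_mes i_lluvia 0) else st)
    (0, 0)
  -- pass 2: collect the days whose rainfall equals it (state = (dia_mayor, dias))
  let step2 := (PySem.List.pyRange 0 (PySem.List.len lluvia_mes) 2).foldl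
    (fun (st : Int × List Int) i_lluvia =>
      let cant_lluvia := PySem.List.pyGetD lluvia_mes (i_lluvia + 1) 0
      if cant_lluvia = step1.1 then
        (PySem.List.pyGetD lluvia_mes i_lluvia 0, st.2 ++ [PySem.List.pyGetD lluvia_mes i_lluvia 0])
      else st)
    (step1.2, [])
  step2.2

-- ===== PORT B =====
def dias_mas_lluvia_alt (lluvia_mes : List Int) : List Int :=
  ((PySem.List.pyRange 0 (PySem.List.len lluvia_mes) 2).foldl
    (fun (st : Int × List Int) i_lluvia =>
      let cant_lluvia := PySem.List.pyGetD lluvia_mes (i_lluvia + 1) 0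
      if cant_lluvia > st.1 then (cant_lluvia, [PySem.List.pyGetD lluvia_mes i_lluvia 0])
      else if cant_lluvia = st.1 then (st.1, st.2 ++ [PySem.List.pyGetD lluvia_mes i_lluvia 0])
      else st)
    (0, [])).2

-- ===== PRECONDITION & SPEC =====
-- A (and B) read lluvia_mes[i+1] for each even i < len; on odd length the last read raises IndexError.
def Pre_dias_mas_lluvia (lluvia_mes : List Int) : Prop := lluvia_mes.length % 2 = 0
instance (lluvia_mes : List Int) : Decidable (Pre_dias_mas_lluvia lluvia_mes) := by
  unfold Pre_dias_mas_lluvia; infer_instance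
def pvWitness_dias_mas_lluvia : List Int := [1, 5, 2, 3, 3, 5]

def Spec_dias_mas_lluvia (lluvia_mes : List Int) (out : List Int) : Prop := out = dias_mas_lluvia_alt lluvia_mes
instance (lluvia_mes : List Int) (out : List Int) : Decidable (Spec_dias_mas_lluvia lluvia_mes out) := by unfold Spec_dias_mas_lluvia; infer_instance

-- ===== CLAIM (what is proved, stated in full; the proofs are below) =====
def Claim_equal_dias_mas_lluvia : Prop := ∀ (lluvia_mes : List Int), Dom_dias_mas_lluvia lluvia_mes → Pre_dias_mas_lluvia lluvia_mes → Spec_dias_mas_lluvia lluvia_mes (dias_mas_lluvia lluvia_mes)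

-- ===== LEMMAS AND PROOFS =====

-- the (day, rain) pairs of an even-length list
def pvPairs : List Int → List (Int × Int)
  | a :: b :: t => (a, b) :: pvPairs t
  | _ => []

-- fold over range(len/2) with indexed reads = fold over the pairs
theorem pvRangeFold {σ : Type} : ∀ (xs : List Int), xs.length % 2 = 0 →
    ∀ (f : σ → Int → Int → σ) (init : σ),
    (List.range (xs.length / 2)).foldl (fun s k => f s (xs.getD (2 * k) 0) (xs.getD (2 * k + 1) 0)) init
      = (pvPairs xs).foldl (fun s p => f s p.1 p.2) init := by
  intro xs
  induction xs using pvPairs.induct with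
  | case1 a b t ih =>
    intro hev f init
    have hev' : t.length % 2 = 0 := by
      simp only [List.length_cons] at hev; omega
    have hlen : (a :: b :: t).length / 2 = t.length / 2 + 1 := by
      simp only [List.length_cons]; omega
    rw [hlen, List.range_succ_eq_map, List.foldl_cons, List.foldl_map]
    simp only [Nat.mul_zero, List.getD_cons_zero, Nat.zero_add, List.getD_cons_succ]
    rw [PySem.List.foldl_congr_mem _ _
      (fun s k => f s (t.getD (2 * k) 0) (t.getD (2 * k + 1) 0)) _ ?_]
    · exact ih hev' f (f init a b)
    · intro s k _
      have h1 : 2 * (k + 1) = 2 * k + 1 + 1 := by omega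
      rw [h1]
      simp
  | case2 t hne =>
    intro hev f init
    match t, hne with
    | [], _ => simp [pvPairs]
    | [a], _ => simp at hev
    | a :: b :: t1, hne => exact absurd rfl (hne a b t1)

-- the Python fold over range(0, len, 2) reduces to the pair fold
theorem pvFoldPairs {σ : Type} (xs : List Int) (h : xs.length % 2 = 0)
    (f : σ → Int → Int → σ) (init : σ) :
    (PySem.List.pyRange 0 (PySem.List.len xs) 2).foldl
        (fun s i => f s (PySem.List.pyGetD xs i 0) (PySem.List.pyGetD xs (i + 1) 0)) init
      = (pvPairs xs).foldl (fun s p => f s p.1 p.2) init := by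
  rw [PySem.List.pyRange_of_pos 0 (PySem.List.len xs) (by norm_num)]
  have hcount : (if (0 : Int) < PySem.List.len xs
      then ((PySem.List.len xs - 0 + 2 - 1) / 2).toNat else 0) = xs.length / 2 := by
    simp only [PySem.List.len]
    split_ifs with h0 <;> omega
  rw [hcount, List.foldl_map]
  rw [PySem.List.foldl_congr_mem _ _
    (fun s k => f s (xs.getD (2 * k) 0) (xs.getD (2 * k + 1) 0)) _ ?_]
  · exact pvRangeFold xs h f init
  · intro s k _
    have e1 : (0 : Int) + 2 * (k : Int) = ((2 * k : Nat) : Int) := by push_cast; ring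
    rw [e1]
    have e2 : ((2 * k : Nat) : Int) + 1 = ((2 * k + 1 : Nat) : Int) := by push_cast; ring
    rw [e2, PySem.List.pyGetD_natCast, PySem.List.pyGetD_natCast]

-- the maximum rainfall A's first pass computes, at pair level
def pvM (l : List (Int × Int)) (m0 : Int) : Int :=
  l.foldl (fun m p => if p.2 > m then p.2 else m) m0

theorem pvM_ge_init : ∀ (l : List (Int × Int)) (m0 : Int), m0 ≤ pvM l m0 := by
  intro l
  induction l with
  | nil => intro m0; simp [pvM]
  | cons p t ih =>
    intro m0
    simp only [pvM, List.foldl_cons]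
    split
    · exact le_trans (le_of_lt (by assumption)) (ih p.2)
    · exact ih m0

theorem pvM_ge : ∀ (l : List (Int × Int)) (m0 : Int) (p : Int × Int), p ∈ l → p.2 ≤ pvM l m0 := by
  intro l
  induction l with
  | nil => intro _ _ h; simp at h
  | cons q t ih =>
    intro m0 p hp
    rcases List.mem_cons.mp hp with h | h
    · subst h
      simp only [pvM, List.foldl_cons]
      split
      · exact pvM_ge_init t p.2
      · exact le_trans (by omega) (pvM_ge_init t m0)
    · simp only [pvM, List.foldl_cons]
      split <;> exact ih _ p h

-- the first component of A's pass-1 fold is pvM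
theorem pvA1_fst : ∀ (l : List (Int × Int)) (st : Int × Int),
    (l.foldl (fun (st : Int × Int) p => if p.2 > st.1 then (p.2, p.1) else st) st).1 = pvM l st.1 := by
  intro l
  induction l with
  | nil => intro st; simp [pvM]
  | cons p t ih =>
    intro st
    simp only [List.foldl_cons, pvM]
    split <;> simp [ih, pvM]

-- the second component of A's pass-2 fold collects the matching first components
theorem pvA2_snd : ∀ (l : List (Int × Int)) (c : Int) (st : Int × List Int),
    (l.foldl (fun (st : Int × List Int) p => if p.2 = c then (p.1, st.2 ++ [p.1]) else st) st).2
      = st.2 ++ (l.filter (fun p => p.2 = c)).map (·.1) := by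
  intro l
  induction l with
  | nil => intro c st; simp
  | cons p t ih =>
    intro c st
    simp only [List.foldl_cons]
    by_cases h : p.2 = c
    · simp [h, ih]
    · simp [h, ih]

-- B's fused fold computes (maximum, days matching it)
theorem pvB_spec : ∀ (l : List (Int × Int)),
    l.foldl (fun (st : Int × List Int) p =>
        if p.2 > st.1 then (p.2, [p.1])
        else if p.2 = st.1 then (st.1, st.2 ++ [p.1])
        else st) (0, [])
      = (pvM l 0, (l.filter (fun p => p.2 = pvM l 0)).map (·.1)) := by
  intro l
  induction l using List.reverseRecOn with
  | nil => simp [pvM]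
  | append_singleton t q ih =>
    have hM : pvM (t ++ [q]) 0 = if q.2 > pvM t 0 then q.2 else pvM t 0 := by
      simp [pvM, List.foldl_append]
    rw [List.foldl_append, ih, List.foldl_cons, List.foldl_nil]
    by_cases h1 : q.2 > pvM t 0
    · have hnone : t.filter (fun p => p.2 = q.2) = [] := by
        rw [List.filter_eq_nil_iff]
        intro p hp
        have := pvM_ge t 0 p hp
        simp; omega
      simp only [hM, if_pos h1, List.filter_append, hnone, List.filter_cons]
      simp
    · by_cases h2 : q.2 = pvM t 0
      · simp only [hM, if_neg h1, List.filter_append, List.filter_cons]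
        simp [h2]
      · simp only [hM, if_neg h1, List.filter_append, List.filter_cons]
        simp [h2]

-- ===== VERDICT (by name: the statement is the Claim_ definition above) =====
theorem dias_mas_lluvia_spec : Claim_equal_dias_mas_lluvia := by
  intro xs _ hpre
  unfold Spec_dias_mas_lluvia dias_mas_lluvia dias_mas_lluvia_alt
  simp only []
  rw [pvFoldPairs xs hpre (fun (st : Int × Int) d c => if c > st.1 then (c, d) else st) (0, 0)]
  rw [pvFoldPairs xs hpre (fun (st : Int × List Int) d c =>
      if c = ((pvPairs xs).foldl (fun (st : Int × Int) p =>
        if p.2 > st.1 then (p.2, p.1) else st) (0, 0)).1 then (d, st.2 ++ [d]) else st) _]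
  rw [pvFoldPairs xs hpre (fun (st : Int × List Int) d c =>
      if c > st.1 then (c, [d]) else if c = st.1 then (st.1, st.2 ++ [d]) else st) (0, [])]
  rw [pvB_spec (pvPairs xs), pvA1_fst (pvPairs xs) (0, 0), pvA2_snd (pvPairs xs) _ _]
  simp
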